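-- pv_equiv track=rewrite | github.com/Jiangjao/bioinformatics | learnD3/test7.py | find_duplicates_with_index
-- ===== SOURCE A (Python) =====
-- from collections import defaultdict
--
-- def find_duplicates_with_index(lst):
--     """
--     param: lst(list)
--
--     return dict
--     """
--     duplicates = defaultdict(list)
--     seen = set()
--
--     for i, item in enumerate(lst):
--         item = item.strip()
--         duplicates[item].append(i)
--         if item in seen:
--             # if item in duplicates:
--             #     duplicates[item].append(i)
--             # else:
--             #     duplicates[item].append(i)
--             pass
--                 # duplicates[item] = [i]
--         else:
--             seen.add(item)
--
--     return {key: value for key, value in duplicates.items() if len(value) > 1}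
-- ===== SOURCE B (Python) =====
-- def find_duplicates_with_index(lst):
--     """
--     param: lst(list)
--
--     return dict
--     """
--     stripped = [item.strip() for item in lst]
--     pairs = []
--     for j, s in enumerate(stripped):
--         if s not in stripped[:j]:  # first occurrence of s
--             idxs = [i for i, t in enumerate(stripped) if t == s]
--             if len(idxs) > 1:
--                 pairs.append((s, idxs))
--     return dict(pairs)
-- ===== Notes on version B (the rewrite author's own statement) =====
-- stated objective: alternative
-- what changed: B abandons A's defaultdict-bucketing with a 'seen' set entirely: it strips once, then for each position that is the first occurrence of its stripped value (a membership test against the prefix of already-seen values) it gathers that value's indices by rescanning the whole list, keeping it only when more than one index is found, and finally builds the dict from the collected (key, indices) pairs; dict-free nested scans instead of hash bucketing.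
import Mathlib
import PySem

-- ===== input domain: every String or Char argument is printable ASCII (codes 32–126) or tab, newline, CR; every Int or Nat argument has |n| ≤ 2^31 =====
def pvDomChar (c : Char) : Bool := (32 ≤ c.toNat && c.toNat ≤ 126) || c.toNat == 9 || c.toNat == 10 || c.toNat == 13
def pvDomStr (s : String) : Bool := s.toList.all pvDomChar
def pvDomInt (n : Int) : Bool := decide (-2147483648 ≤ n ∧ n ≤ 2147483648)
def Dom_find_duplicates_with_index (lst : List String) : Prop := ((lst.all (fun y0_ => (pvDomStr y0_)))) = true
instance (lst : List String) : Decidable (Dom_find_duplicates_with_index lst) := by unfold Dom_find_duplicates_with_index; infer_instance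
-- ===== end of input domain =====

-- B drops A's defaultdict/seen-set bucketing entirely: it walks first occurrences (a membership
-- test against the already-seen prefix) and gathers each duplicate's indices by rescanning the
-- whole list (objective: alternative — dict-free nested scans, O(n^2) vs A's O(n) hashing).


-- ===== PORT A =====
def find_duplicates_with_index (lst : List String) : List (String × List Int) :=
  let st := (PySem.List.enumerate lst).foldl
    (fun (st : PySem.Dict String (List Int) × PySem.Set String) p =>
      let item := PySem.Str.strip p.2
      let d := st.1.modify item [] (fun v => v ++ [p.1])   -- defaultdict(list): duplicates[item].append(i)
      if PySem.Set.contains st.2 item then (d, st.2)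
      else (d, PySem.Set.add st.2 item))
    (PySem.Dict.empty, PySem.Set.empty)
  (st.1.items).filter (fun kv => kv.2.length > 1)

-- ===== PORT B =====
def find_duplicates_with_index_alt (lst : List String) : List (String × List Int) :=
  let stripped := lst.map PySem.Str.strip
  let pairs := (PySem.List.enumerate stripped).foldl
    (fun (pairs : List (String × List Int)) p =>
      if (PySem.List.slice stripped none (some p.1)).contains p.2 then pairs   -- s not in stripped[:j]
      else
        let idxs := ((PySem.List.enumerate stripped).filter (fun q => q.2 == p.2)).map (fun q => q.1)
        if idxs.length > 1 then pairs ++ [(p.2, idxs)] else pairs)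
    []
  (PySem.Dict.ofList pairs).items   -- dict(pairs)

-- ===== PRECONDITION & SPEC =====
def Spec_find_duplicates_with_index (lst : List String) (out : List (String × List Int)) : Prop := out = find_duplicates_with_index_alt lst
instance (lst : List String) (out : List (String × List Int)) : Decidable (Spec_find_duplicates_with_index lst out) := by unfold Spec_find_duplicates_with_index; infer_instance

-- ===== CLAIM (what is proved, stated in full; the proofs are below) =====
def Claim_equal_find_duplicates_with_index : Prop := ∀ (lst : List String), Dom_find_duplicates_with_index lst → Spec_find_duplicates_with_index lst (find_duplicates_with_index lst)

-- ===== LEMMAS AND PROOFS =====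

-- the common canonical form: first occurrences of stripped items with count > 1, each with its index list
def pvCanon (lst : List String) : List (String × List Int) :=
  ((PySem.Set.ofList (lst.map PySem.Str.strip)).filter
      (fun k => decide (1 < List.count k (lst.map PySem.Str.strip)))).map
    (fun k => (k, ((PySem.List.enumerate (lst.map PySem.Str.strip)).filter (fun q => q.2 == k)).map (fun q => q.1)))

theorem pv_proj (xs : List (Int × String)) (d : PySem.Dict String (List Int)) (s : PySem.Set String) :
    (xs.foldl
      (fun (st : PySem.Dict String (List Int) × PySem.Set String) p =>
        let item := PySem.Str.strip p.2
        let d := st.1.modify item [] (fun v => v ++ [p.1])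
        if PySem.Set.contains st.2 item then (d, st.2)
        else (d, PySem.Set.add st.2 item))
      (d, s)).1
    = xs.foldl (fun d p => d.modify (PySem.Str.strip p.2) [] (fun v => v ++ [p.1])) d := by
  induction xs generalizing d s with
  | nil => rfl
  | cons x xs ih =>
    simp only [List.foldl_cons]
    split
    · exact ih _ _
    · exact ih _ _

theorem pv_enumerate_map {α β : Type} (f : α → β) (xs : List α) (s : Int) :
    PySem.List.enumerate (xs.map f) s = (PySem.List.enumerate xs s).map (fun p => (p.1, f p.2)) := by
  induction xs generalizing s with
  | nil => rfl
  | cons x xs ih => simp [PySem.List.enumerate_cons, ih]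

-- A-side characterisation
theorem pv_A (lst : List String) :
    find_duplicates_with_index lst
    = ((PySem.Set.ofList (lst.map PySem.Str.strip)).filter
        (fun k => decide (1 < List.count k (lst.map PySem.Str.strip)))).map
        (fun k => (k, (((PySem.List.enumerate lst).map (fun p => (PySem.Str.strip p.2, p.1))).filter
            (fun p => p.1 == k)).map (fun p => p.2))) := by
  unfold find_duplicates_with_index
  simp only [pv_proj]
  rw [show (fun (d : PySem.Dict String (List Int)) (p : Int × String) =>
        d.modify (PySem.Str.strip p.2) [] (fun v => v ++ [p.1]))
      = (fun d p => ((fun (d : PySem.Dict String (List Int)) (p : String × Int) =>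
            d.modify p.1 [] (fun v => v ++ [p.2])) d ((fun p : Int × String => (PySem.Str.strip p.2, p.1)) p))) from rfl]
  rw [← List.foldl_map (f := fun p : Int × String => (PySem.Str.strip p.2, p.1))
      (g := fun (d : PySem.Dict String (List Int)) (p : String × Int) => d.modify p.1 [] (fun v => v ++ [p.2]))
      (l := PySem.List.enumerate lst) (init := PySem.Dict.empty)]
  set l := (PySem.List.enumerate lst).map (fun p : Int × String => (PySem.Str.strip p.2, p.1)) with hl
  have hnd : (l.foldl (fun d p => d.modify p.1 [] (fun v => v ++ [p.2])) PySem.Dict.empty).keys.Nodup := by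
    exact PySem.Dict.nodup_keys_foldl_modify_key l Prod.fst [] (fun _ p => (fun v => v ++ [p.2])) _ (by simp)
  rw [PySem.Dict.items_eq_map_keys _ hnd []]
  rw [PySem.Dict.keys_foldl_modify_key l Prod.fst [] (fun _ p => (fun v => v ++ [p.2]))]
  have h1 : List.map PySem.Str.strip lst = l.map Prod.fst := by
    rw [hl, List.map_map]
    show List.map PySem.Str.strip lst = List.map (PySem.Str.strip ∘ (fun p : Int × String => p.2)) (PySem.List.enumerate lst)
    rw [← List.map_map, PySem.List.map_snd_enumerate]
  have hkeys : PySem.Set.update (PySem.Dict.empty : PySem.Dict String (List Int)).keys (l.map Prod.fst)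
      = PySem.Set.ofList (lst.map PySem.Str.strip) := by
    rw [← h1]
    simp [PySem.Set.update, PySem.Set.ofList_eq_foldl, PySem.Dict.keys_empty]
  rw [hkeys, List.filter_map]
  have hg : ∀ k, (l.foldl (fun d p => d.modify p.1 [] (fun v => v ++ [p.2])) PySem.Dict.empty).getD k []
      = (l.filter (fun p => p.1 == k)).map (fun p => p.2) := by
    intro k
    rw [PySem.Dict.getD_foldl_modify_append]
    simp
  have hlen : ∀ k, ((l.filter (fun p => p.1 == k)).map (fun p : String × Int => p.2)).length
      = List.count k (List.map PySem.Str.strip lst) := by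
    intro k
    rw [List.length_map, h1, List.count_eq_length_filter, hl, List.map_map]
    simp [List.filter_map, Function.comp_def]
  congr 1
  · funext k
    rw [hg]
  · apply List.filter_congr
    intro k _
    simp only [Function.comp_apply]
    rw [hg, hlen]

-- pv_A's right-hand side is pvCanon
theorem pv_A_canon (lst : List String) : find_duplicates_with_index lst = pvCanon lst := by
  rw [pv_A]
  unfold pvCanon
  apply List.map_congr_left
  intro k _
  rw [pv_enumerate_map]
  simp [List.filter_map, List.map_map, Function.comp_def]

-- first occurrences of suf not preceded (in pre ++ suf) by an equal element
def pvFO (pre suf : List String) : List String :=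
  match suf with
  | [] => []
  | x :: s => if pre.contains x then pvFO (pre ++ [x]) s else x :: pvFO (pre ++ [x]) s

theorem pvFO_congr (suf : List String) : ∀ (pre1 pre2 : List String),
    (∀ a, a ∈ pre1 ↔ a ∈ pre2) → pvFO pre1 suf = pvFO pre2 suf := by
  induction suf with
  | nil => intro _ _ _; rfl
  | cons x s ih =>
    intro pre1 pre2 h
    have hx : pre1.contains x = pre2.contains x := by
      by_cases hm : x ∈ pre1
      · simp [hm, (h x).mp hm]
      · have hm2 : x ∉ pre2 := fun hc => hm ((h x).mpr hc)
        simp [hm, hm2]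
    have h' : ∀ a, a ∈ pre1 ++ [x] ↔ a ∈ pre2 ++ [x] := by
      intro a; simp [h a]
    simp only [pvFO, hx]
    rw [ih _ _ h']

theorem pv_update_FO (suf : List String) : ∀ (pre : List String),
    PySem.Set.update pre suf = pre ++ pvFO pre suf := by
  induction suf with
  | nil => intro pre; simp [PySem.Set.update, pvFO]
  | cons x s ih =>
    intro pre
    show PySem.Set.update (PySem.Set.add pre x) s = pre ++ pvFO pre (x :: s)
    by_cases hc : pre.contains x = true
    · have hmem : x ∈ pre := List.contains_iff_mem.mp hc
      have hadd : PySem.Set.add pre x = pre := by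
        simp [PySem.Set.add, PySem.Set.contains, hmem]
      rw [hadd, ih pre]
      have hfo : pvFO pre (x :: s) = pvFO (pre ++ [x]) s := by simp [pvFO, hmem]
      rw [hfo]
      congr 1
      refine pvFO_congr s pre (pre ++ [x]) ?_
      intro a
      constructor
      · intro ha; exact List.mem_append.mpr (Or.inl ha)
      · intro ha
        rcases List.mem_append.mp ha with ha | ha
        · exact ha
        · simp at ha; subst ha; exact hmem
    · have hmem : x ∉ pre := fun h => hc (List.contains_iff_mem.mpr h)
      have hadd : PySem.Set.add pre x = pre ++ [x] := by
        simp [PySem.Set.add, PySem.Set.contains, hmem]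
      rw [hadd, ih (pre ++ [x])]
      simp only [pvFO, hc]
      simp

theorem pv_ofList_FO (xs : List String) : PySem.Set.ofList xs = pvFO [] xs := by
  have h := pv_update_FO xs []
  rw [PySem.Set.ofList_eq_foldl]
  simpa [PySem.Set.update] using h

theorem pv_core (suf : List String) : ∀ (pre : List String),
    ((PySem.List.enumerate suf ((pre.length : Nat) : Int)).filter
       (fun p => !((pre ++ suf).take p.1.toNat).contains p.2)).map (fun p => p.2)
    = pvFO pre suf := by
  induction suf with
  | nil => intro pre; rfl
  | cons x s ih =>
    intro pre
    rw [PySem.List.enumerate_cons]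
    have htake : ((pre ++ x :: s).take ((pre.length : Int)).toNat) = pre := by
      simp
    have hnext : ((pre.length : Int) + 1) = (((pre ++ [x]).length : Nat) : Int) := by
      simp only [List.length_append, List.length_cons, List.length_nil]
      push_cast
      omega
    have happ : pre ++ x :: s = (pre ++ [x]) ++ s := by simp
    rw [List.filter_cons]
    simp only [htake]
    by_cases hc : pre.contains x = true
    · have hmem : x ∈ pre := List.contains_iff_mem.mp hc
      rw [hc, if_neg (by simp)]
      rw [hnext, happ, ih (pre ++ [x])]
      simp [pvFO, hmem]
    · have hmem : x ∉ pre := fun h => hc (List.contains_iff_mem.mpr h)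
      have hcf : pre.contains x = false := by simpa using hc
      rw [hcf, if_pos (by simp)]
      rw [List.map_cons, hnext, happ, ih (pre ++ [x])]
      simp [pvFO, hmem]

-- length of the gathered index list is the count
theorem pv_len (stripped : List String) (k : String) :
    (((PySem.List.enumerate stripped).filter (fun q => q.2 == k)).map (fun q => q.1)).length
    = List.count k stripped := by
  rw [List.length_map, List.count_eq_length_filter]
  conv_rhs => rw [← PySem.List.map_snd_enumerate stripped 0]
  rw [List.filter_map, List.length_map]
  rfl

-- B-side characterisation
theorem pv_B_canon (lst : List String) : find_duplicates_with_index_alt lst = pvCanon lst := by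
  unfold find_duplicates_with_index_alt pvCanon
  simp only
  set stripped := lst.map PySem.Str.strip with hs
  set idxs : String → List Int :=
    fun k => ((PySem.List.enumerate stripped).filter (fun q => q.2 == k)).map (fun q => q.1) with hidxs
  set g : Int × String → String × List Int := fun p => (p.2, idxs p.2) with hg
  set qb : Int × String → Bool :=
    fun p => (!(PySem.List.slice stripped none (some p.1)).contains p.2) && decide (1 < (idxs p.2).length) with hqb
  have hstep : (fun (pairs : List (String × List Int)) (p : Int × String) =>
      if (PySem.List.slice stripped none (some p.1)).contains p.2 then pairs
      else
        let idxs := ((PySem.List.enumerate stripped).filter (fun q => q.2 == p.2)).map (fun q => q.1)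
        if idxs.length > 1 then pairs ++ [(p.2, idxs)] else pairs)
      = (fun pairs p => if qb p = true then pairs ++ [g p] else pairs) := by
    funext pairs p
    by_cases hc : p.2 ∈ PySem.List.slice stripped none (some p.1)
    · simp [hqb, hidxs, hc]
    · by_cases hl : 1 < ((PySem.List.enumerate stripped).filter (fun q => q.2 == p.2)).length
      · simp [hqb, hg, hidxs, hc, hl]
      · simp [hqb, hidxs, hc, hl]
  rw [hstep, PySem.List.foldl_append_if qb g, List.nil_append]
  have hfc : (PySem.List.enumerate stripped 0).filter qb
      = (PySem.List.enumerate stripped 0).filter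
          (fun p => (!(stripped.take p.1.toNat).contains p.2) && decide (1 < (idxs p.2).length)) := by
    apply List.filter_congr
    intro p hp
    have hpos : 0 ≤ p.1 := by
      have h1 : p.1 ∈ (PySem.List.enumerate stripped 0).map (fun x => x.1) := List.mem_map_of_mem hp
      rw [PySem.List.map_fst_enumerate] at h1
      have := PySem.List.mem_pyRange_one.mp (by simpa using h1)
      exact this.1
    simp only [hqb, PySem.List.slice_to stripped hpos]
  rw [hfc]
  have hsplit : (PySem.List.enumerate stripped 0).filter
        (fun p => (!(stripped.take p.1.toNat).contains p.2) && decide (1 < (idxs p.2).length))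
      = ((PySem.List.enumerate stripped 0).filter
          (fun p => !(stripped.take p.1.toNat).contains p.2)).filter
          (fun p => decide (1 < (idxs p.2).length)) := by
    rw [List.filter_filter]
    apply List.filter_congr
    intro p _
    exact (Bool.and_comm _ _).symm
  rw [hsplit]
  set X := (PySem.List.enumerate stripped 0).filter
      (fun p => !(stripped.take p.1.toNat).contains p.2) with hX
  have hmapg : (X.filter (fun p => decide (1 < (idxs p.2).length))).map g
      = ((X.map (fun p => p.2)).filter (fun k => decide (1 < (idxs k).length))).map
          (fun k => (k, idxs k)) := by
    rw [List.filter_map]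
    rw [List.map_map]
    rfl
  rw [hmapg]
  have hsnd : X.map (fun p => p.2) = PySem.Set.ofList stripped := by
    rw [hX, pv_ofList_FO]
    have h := pv_core stripped []
    simpa using h
  rw [hsnd]
  have hq0 : (PySem.Set.ofList stripped).filter (fun k => decide (1 < (idxs k).length))
      = (PySem.Set.ofList stripped).filter (fun k => decide (1 < List.count k stripped)) := by
    apply List.filter_congr
    intro k _
    simp only [hidxs, pv_len]
  rw [hq0]
  set Y := (PySem.Set.ofList stripped).filter (fun k => decide (1 < List.count k stripped)) with hY
  set pairs := Y.map (fun k => (k, idxs k)) with hpairs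
  have hofl : PySem.Dict.ofList pairs
      = pairs.foldl (fun d (a : String × List Int) => d.insert a.1 a.2) PySem.Dict.empty := rfl
  have hndk : (pairs.map Prod.fst).Nodup := by
    rw [hpairs, List.map_map]
    have : (Prod.fst ∘ fun k => (k, idxs k)) = id := rfl
    rw [this, List.map_id]
    exact (PySem.Set.nodup_ofList stripped).filter _
  have hitems : (PySem.Dict.ofList pairs).items = pairs := by
    rw [hofl]
    have h := PySem.Dict.items_foldl_insert_fresh pairs Prod.fst Prod.snd PySem.Dict.empty
      (fun a _ => PySem.Dict.contains_empty a.1) hndk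
    have he : (PySem.Dict.empty : PySem.Dict String (List Int)).items = [] := rfl
    rw [he] at h
    simpa using h
  rw [hitems, hpairs, hidxs]

-- ===== VERDICT (by name: the statement is the Claim_ definition above) =====
theorem find_duplicates_with_index_spec : Claim_equal_find_duplicates_with_index := by
  intro lst _
  unfold Spec_find_duplicates_with_index
  rw [pv_A_canon, pv_B_canon]
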